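-- pv_equiv track=rewrite | github.com/josue130/ExamenesCorregidos | ExamenIIICorregido.py | computable_aux
-- ===== SOURCE A (Python) =====
-- def largo1(matriz):
--      cont=0
--      for i in matriz:
--           cont+=1
--      return cont
--
-- def computable_aux(numero):
--      potencia=0
--      nuevoNumero=0
--      while numero!=0:
--           nuevoNumero+= (numero%8) * (10**potencia)
--           numero=numero//8
--           potencia+=1
--      return validar(nuevoNumero)
--
-- def validar(resultado):
--      pares=[]
--      impares=[]
--      num=resultado
--      while num!=0:
--           if (num%10)%2==0:
--                pares+=[num%10]
--                num=num//10
--           else: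
--                impares+=[num%10]
--                num=num//10
--      if largo1(pares) > largo1(impares):
--           return True
--      else:
--           return False
-- ===== SOURCE B (Python) =====
-- def computable_aux(numero):
--     pares = 0
--     impares = 0
--     while numero != 0:
--         d = numero % 8
--         if d % 2 == 0:
--             pares += 1
--         else:
--             impares += 1
--         numero //= 8
--     return pares > impares
-- ===== Notes on version B (the rewrite author's own statement) =====
-- stated objective: simpler
-- what changed: B counts even/odd octal digits with two integer counters in one direct base-8 loop, dropping A's decimal re-encoding of the octal representation, the separate validar digit-splitting pass into two lists, and the largo1 list-length helper.
import Mathlib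
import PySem

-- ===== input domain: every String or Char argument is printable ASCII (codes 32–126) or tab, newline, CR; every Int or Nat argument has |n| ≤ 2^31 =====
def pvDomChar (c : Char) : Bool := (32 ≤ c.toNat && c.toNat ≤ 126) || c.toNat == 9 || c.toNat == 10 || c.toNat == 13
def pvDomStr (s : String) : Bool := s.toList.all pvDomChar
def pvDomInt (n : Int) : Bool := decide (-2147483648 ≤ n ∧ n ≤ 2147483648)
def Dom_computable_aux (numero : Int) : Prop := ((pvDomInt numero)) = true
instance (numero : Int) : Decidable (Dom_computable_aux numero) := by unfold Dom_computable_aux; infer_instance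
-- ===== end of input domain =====

-- B counts even/odd octal digits with two integer counters in one base-8 loop,
-- dropping A's decimal re-encoding, the separate validar pass and the largo1 helper (objective: simpler).


-- ===== PORT A =====
-- 'for i in matriz: cont+=1' in largo1
def pvLargo1 (matriz : List Int) : Int :=
  matriz.foldl (fun cont _ => cont + 1) 0

-- while loop of computable_aux; 'numero ≤ 0' instead of 'numero ≠ 0' is a termination
-- guard only: for negative numero the Python loop never terminates (excluded by Pre_).
def pvLoopA (numero : Int) (potencia : Nat) (nuevoNumero : Int) : Int :=
  if h : numero ≤ 0 then nuevoNumero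
  else pvLoopA (PySem.Int.floordiv numero 8) (potencia + 1)
         (nuevoNumero + (PySem.Int.mod numero 8) * (10 : Int) ^ potencia)
termination_by numero.toNat
decreasing_by
  have := PySem.Int.floordiv_eq_ediv_of_pos (a := numero) (b := 8) (by omega)
  rw [this]; omega

-- while loop of validar; same termination guard (num is nonnegative whenever reached under Pre_).
def pvValidarLoop (num : Int) (pares impares : List Int) : List Int × List Int :=
  if h : num ≤ 0 then (pares, impares)
  else if PySem.Int.mod (PySem.Int.mod num 10) 2 = 0 then
    pvValidarLoop (PySem.Int.floordiv num 10) (pares ++ [PySem.Int.mod num 10]) impares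
  else
    pvValidarLoop (PySem.Int.floordiv num 10) pares (impares ++ [PySem.Int.mod num 10])
termination_by num.toNat
decreasing_by
  all_goals
    have := PySem.Int.floordiv_eq_ediv_of_pos (a := num) (b := 10) (by omega)
    rw [this]; omega

def pvValidar (resultado : Int) : Bool :=
  let r := pvValidarLoop resultado [] []
  if pvLargo1 r.1 > pvLargo1 r.2 then true else false

def computable_aux (numero : Int) : Bool :=
  pvValidar (pvLoopA numero 0 0)

-- ===== PORT B =====
-- single while loop of Source B; 'numero ≤ 0' is the same termination guard (negatives excluded by Pre_)
def pvLoopB (numero : Int) (pares impares : Int) : Bool :=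
  if h : numero ≤ 0 then decide (pares > impares)
  else
    if PySem.Int.mod (PySem.Int.mod numero 8) 2 = 0 then
      pvLoopB (PySem.Int.floordiv numero 8) (pares + 1) impares
    else
      pvLoopB (PySem.Int.floordiv numero 8) pares (impares + 1)
termination_by numero.toNat
decreasing_by
  all_goals
    have := PySem.Int.floordiv_eq_ediv_of_pos (a := numero) (b := 8) (by omega)
    rw [this]; omega

def computable_aux_alt (numero : Int) : Bool :=
  pvLoopB numero 0 0

-- ===== PRECONDITION & SPEC =====
-- Pre_ excludes negative numero: there both Pythons loop forever (-1 // 8 == -1), so A never returns.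
def Pre_computable_aux (numero : Int) : Prop := 0 ≤ numero
instance (numero : Int) : Decidable (Pre_computable_aux numero) := by unfold Pre_computable_aux; infer_instance
def pvWitness_computable_aux : Int := (42)

def Spec_computable_aux (numero : Int) (out : Bool) : Prop := out = computable_aux_alt numero
instance (numero : Int) (out : Bool) : Decidable (Spec_computable_aux numero out) := by unfold Spec_computable_aux; infer_instance

-- ===== CLAIM (what is proved, stated in full; the proofs are below) =====
def Claim_equal_computable_aux : Prop := ∀ (numero : Int), Dom_computable_aux numero → Pre_computable_aux numero → Spec_computable_aux numero (computable_aux numero)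

-- ===== LEMMAS AND PROOFS =====

-- Nat model: octal digits (low to high), decimal digits, decimal re-encoding of a digit list.
def odig (n : Nat) : List Nat :=
  if n = 0 then [] else n % 8 :: odig (n / 8)

def ddig (n : Nat) : List Nat :=
  if n = 0 then [] else n % 10 :: ddig (n / 10)

def enc : List Nat → Nat
  | [] => 0
  | d :: ds => d + 10 * enc ds

theorem largo1_eq_length (xs : List Int) : pvLargo1 xs = (xs.length : Int) := by
  have h : ∀ (a : Int) (ys : List Int),
      ys.foldl (fun cont _ => cont + 1) a = a + ys.length := by
    intro a ys
    induction ys generalizing a with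
    | nil => simp
    | cons y ys ih => simp [List.foldl, ih]; omega
  simpa [pvLargo1] using h 0 xs

theorem floordiv_cast8 (n : Nat) :
    PySem.Int.floordiv (n : Int) 8 = ((n / 8 : Nat) : Int) := by
  exact_mod_cast PySem.Int.floordiv_natCast n 8

theorem floordiv_cast10 (n : Nat) :
    PySem.Int.floordiv (n : Int) 10 = ((n / 10 : Nat) : Int) := by
  exact_mod_cast PySem.Int.floordiv_natCast n 10

theorem mod_cast8 (n : Nat) :
    PySem.Int.mod (n : Int) 8 = ((n % 8 : Nat) : Int) := by
  exact_mod_cast PySem.Int.mod_natCast n 8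

theorem mod_cast10 (n : Nat) :
    PySem.Int.mod (n : Int) 10 = ((n % 10 : Nat) : Int) := by
  exact_mod_cast PySem.Int.mod_natCast n 10

theorem mod_cast2 (n : Nat) :
    PySem.Int.mod (n : Int) 2 = ((n % 2 : Nat) : Int) := by
  exact_mod_cast PySem.Int.mod_natCast n 2

theorem loopA_eq (n : Nat) : ∀ (p : Nat) (nn : Int),
    pvLoopA (n : Int) p nn = nn + (enc (odig n) : Int) * 10 ^ p := by
  induction n using Nat.strong_induction_on with
  | _ n ih =>
    intro p nn
    by_cases h0 : n = 0
    · subst h0; simp [pvLoopA, odig, enc]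
    · rw [pvLoopA]
      have hn : ¬ ((n : Int) ≤ 0) := by omega
      simp only [hn, dite_false]
      rw [floordiv_cast8 n, mod_cast8 n,
        ih (n / 8) (Nat.div_lt_self (Nat.pos_of_ne_zero h0) (by norm_num))]
      have hod : odig n = n % 8 :: odig (n / 8) := by rw [odig, if_neg h0]
      rw [hod, show enc (n % 8 :: odig (n / 8)) = n % 8 + 10 * enc (odig (n / 8)) from rfl]
      push_cast
      ring

theorem validarLoop_eq (n : Nat) : ∀ (ps is : List Int),
    pvValidarLoop (n : Int) ps is =
      (ps ++ ((ddig n).filter (fun d => d % 2 = 0)).map (Int.ofNat),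
       is ++ ((ddig n).filter (fun d => ¬ d % 2 = 0)).map (Int.ofNat)) := by
  induction n using Nat.strong_induction_on with
  | _ n ih =>
    intro ps is
    by_cases h0 : n = 0
    · subst h0; simp [pvValidarLoop, ddig]
    · rw [pvValidarLoop]
      have hn : ¬ ((n : Int) ≤ 0) := by omega
      simp only [hn, dite_false]
      rw [mod_cast10 n, mod_cast2 (n % 10), floordiv_cast10 n]
      have hdd : ddig n = n % 10 :: ddig (n / 10) := by rw [ddig, if_neg h0]
      rw [hdd]
      have hrec := ih (n / 10) (Nat.div_lt_self (Nat.pos_of_ne_zero h0) (by norm_num))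
      by_cases he : n % 10 % 2 = 0
      · rw [if_pos (by exact_mod_cast congrArg (Nat.cast : Nat → Int) he), hrec]
        have h1 : List.filter (fun d => decide (d % 2 = 0)) (n % 10 :: ddig (n / 10)) =
            n % 10 :: List.filter (fun d => decide (d % 2 = 0)) (ddig (n / 10)) := by
          simp [List.filter_cons, he] <;> omega
        have h2 : List.filter (fun d => decide (¬ d % 2 = 0)) (n % 10 :: ddig (n / 10)) =
            List.filter (fun d => decide (¬ d % 2 = 0)) (ddig (n / 10)) := by
          simp [List.filter_cons, he] <;> omega
        rw [h1, h2]
        simp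
      · rw [if_neg (by
          intro hc
          exact he (by exact_mod_cast hc)), hrec]
        have h1 : List.filter (fun d => decide (d % 2 = 0)) (n % 10 :: ddig (n / 10)) =
            List.filter (fun d => decide (d % 2 = 0)) (ddig (n / 10)) := by
          simp [List.filter_cons, he] <;> omega
        have h2 : List.filter (fun d => decide (¬ d % 2 = 0)) (n % 10 :: ddig (n / 10)) =
            n % 10 :: List.filter (fun d => decide (¬ d % 2 = 0)) (ddig (n / 10)) := by
          simp [List.filter_cons, he] <;> omega
        rw [h1, h2]
        simp

theorem loopB_eq (n : Nat) : ∀ (p i : Int),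
    pvLoopB (n : Int) p i =
      decide (p + ((odig n).filter (fun d => d % 2 = 0)).length >
              i + ((odig n).filter (fun d => ¬ d % 2 = 0)).length) := by
  induction n using Nat.strong_induction_on with
  | _ n ih =>
    intro p i
    by_cases h0 : n = 0
    · subst h0; simp [pvLoopB, odig]
    · rw [pvLoopB]
      have hn : ¬ ((n : Int) ≤ 0) := by omega
      simp only [hn, dite_false]
      rw [mod_cast8 n, mod_cast2 (n % 8), floordiv_cast8 n]
      have hod : odig n = n % 8 :: odig (n / 8) := by rw [odig, if_neg h0]
      rw [hod]
      have hrec := ih (n / 8) (Nat.div_lt_self (Nat.pos_of_ne_zero h0) (by norm_num))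
      by_cases he : n % 8 % 2 = 0
      · rw [if_pos (by exact_mod_cast congrArg (Nat.cast : Nat → Int) he), hrec]
        rw [List.filter_cons_of_pos (p := fun d => decide (d % 2 = 0)) (by simpa using he),
          List.filter_cons_of_neg (p := fun d => decide (¬ d % 2 = 0)) (by simpa using he),
          decide_eq_decide]
        simp only [List.length_cons]
        push_cast
        omega
      · rw [if_neg (by
          intro hc
          exact he (by exact_mod_cast hc)), hrec,
          List.filter_cons_of_neg (p := fun d => decide (d % 2 = 0)) (by simpa using he),
          List.filter_cons_of_pos (p := fun d => decide (¬ d % 2 = 0)) (by simpa using he),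
          decide_eq_decide]
        simp only [List.length_cons]
        push_cast
        omega

theorem odig_eq_nil_iff (n : Nat) : odig n = [] ↔ n = 0 := by
  constructor
  · intro h
    by_contra hc
    rw [odig, if_neg hc] at h
    exact List.cons_ne_nil _ _ h
  · intro h; simp [odig, h]

theorem enc_pos (ds : List Nat) (h : ds ≠ []) (hl : ds.getLast? ≠ some 0) : 0 < enc ds := by
  induction ds with
  | nil => exact absurd rfl h
  | cons d ds ih =>
    cases ds with
    | nil =>
      simp [List.getLast?] at hl
      simp [enc]; omega
    | cons x xs =>
      have := ih (List.cons_ne_nil _ _) (by rwa [List.getLast?_cons_cons] at hl)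
      rw [show enc (d :: x :: xs) = d + 10 * enc (x :: xs) from rfl]
      omega

theorem ddig_enc (ds : List Nat) (hd : ∀ d ∈ ds, d < 10)
    (hl : ds.getLast? ≠ some 0) : ddig (enc ds) = ds := by
  induction ds with
  | nil => simp [ddig, enc]
  | cons d ds ih =>
    have hd10 : d < 10 := hd d (by simp)
    cases ds with
    | nil =>
      have hdne : d ≠ 0 := by simpa [List.getLast?] using hl
      have h1 : enc [d] = d := by simp [enc]
      rw [h1, ddig, if_neg hdne, Nat.mod_eq_of_lt hd10, Nat.div_eq_of_lt hd10]
      simp [ddig]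
    | cons x xs =>
      have hl' : (x :: xs).getLast? ≠ some 0 := by rwa [List.getLast?_cons_cons] at hl
      have hpos : 0 < enc (x :: xs) := enc_pos _ (List.cons_ne_nil _ _) hl'
      have hmod : (d + 10 * enc (x :: xs)) % 10 = d := by omega
      have hdiv : (d + 10 * enc (x :: xs)) / 10 = enc (x :: xs) := by omega
      rw [enc, ddig, if_neg (by omega), hmod, hdiv,
        ih (fun y hy => hd y (by simp [hy] )) hl']

theorem odig_lt (n : Nat) : ∀ d ∈ odig n, d < 10 := by
  induction n using Nat.strong_induction_on with
  | _ n ih =>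
    intro d hd
    by_cases h0 : n = 0
    · subst h0; simp [odig] at hd
    · rw [odig, if_neg h0, List.mem_cons] at hd
      rcases hd with rfl | hd
      · omega
      · exact ih (n / 8) (Nat.div_lt_self (Nat.pos_of_ne_zero h0) (by norm_num)) d hd

theorem odig_last (n : Nat) : (odig n).getLast? ≠ some 0 := by
  induction n using Nat.strong_induction_on with
  | _ n ih =>
    by_cases h0 : n = 0
    · simp [odig, h0]
    · rw [odig, if_neg h0]
      rcases hds : odig (n / 8) with _ | ⟨x, xs⟩
      · have h8 : n / 8 = 0 := (odig_eq_nil_iff _).mp hds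
        have : n % 8 ≠ 0 := by omega
        simp [List.getLast?, this]
      · rw [List.getLast?_cons_cons, ← hds]
        exact ih (n / 8) (Nat.div_lt_self (Nat.pos_of_ne_zero h0) (by norm_num))

theorem computable_aux_eq_nat (n : Nat) :
    computable_aux (n : Int) = computable_aux_alt (n : Int) := by
  rw [computable_aux, computable_aux_alt]
  have hA : pvLoopA (n : Int) 0 0 = ((enc (odig n) : Nat) : Int) := by
    rw [loopA_eq]; push_cast; ring
  rw [hA, pvValidar]
  rw [validarLoop_eq (enc (odig n)) [] []]
  rw [ddig_enc (odig n) (odig_lt n) (odig_last n)]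
  rw [loopB_eq n 0 0]
  simp only [List.nil_append, largo1_eq_length, List.length_map]
  by_cases h : ((odig n).filter (fun d => d % 2 = 0)).length >
      ((odig n).filter (fun d => ¬ d % 2 = 0)).length
  · rw [if_pos (by exact_mod_cast h)]
    simp only [gt_iff_lt, zero_add] at *
    exact (decide_eq_true (by exact_mod_cast h)).symm
  · rw [if_neg (by
      intro hc
      exact h (by exact_mod_cast hc))]
    simp only [gt_iff_lt, zero_add] at *
    exact (decide_eq_false (by
      intro hc
      exact h (by exact_mod_cast hc))).symm

-- ===== VERDICT (by name: the statement is the Claim_ definition above) =====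
theorem computable_aux_spec : Claim_equal_computable_aux := by
  intro numero _ hpre
  unfold Spec_computable_aux
  have h0 : 0 ≤ numero := hpre
  obtain ⟨n, rfl⟩ : ∃ m : Nat, numero = (m : Int) := ⟨numero.toNat, by omega⟩
  exact computable_aux_eq_nat n
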